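-- pv_equiv track=rewrite | github.com/Yawn-Sean/Daily_CF_Problems | daily_problems/2026/02/0213/personal_submission/cf106363e_liryc.py | solve
-- ===== SOURCE A (Python) =====
-- def solve(n: int, a: list[int]) -> list[int]:
--     pres, ps = [0] * n, [0] * n
--     vis = [-1] * n
--     for i in range(n):
--         x = a[i]
--         vis[x] = x
--         if x < n - 1 and vis[x + 1] >= 0:
--             vis[x] = vis[x + 1]
--         if x and vis[x - 1] >= 0:
--             vis[x - 1] = vis[x]
--         mex = 0
--         if vis[mex] >= 0:
--             v = mex
--             stk = []
--             while vis[v] != v: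
--                 stk.append(v)
--                 v = vis[v]
--             for u in stk:
--                 vis[u] = v
--             mex = v + 1
--         ps[i] = mex
--         if i:
--             ps[i] += ps[i - 1]
--
--     # all mex sum of [0..i]
--     for i in range(n):
--         pres[i] = ps[i]
--         if i:
--             pres[i] += pres[i - 1]
--     # all mex sum of [i..n-1]
--     sufs = ps # just reuse the memory
--     for i in range(n):
--         sufs[i] = pres[-1]
--         if i:
--             sufs[i] -= pres[i - 1]
--
--     # the sum includes i = all sum - pres[i - 1] - sufs[i + 1]
--     ans = vis # just reuse the memory
--     for i in range(n):
--         ans[i] = pres[-1]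
--         if i:
--             ans[i] -= pres[i - 1]
--         if i < n - 1:
--             ans[i] -= sufs[i + 1]
--
--     return ans
-- ===== SOURCE B (Python) =====
-- def solve(n: int, a: list[int]) -> list[int]:
--     # One pass with a boolean seen-array and a monotone mex pointer; the
--     # prefix/suffix-sum combination of A cancels to the running sum itself.
--     seen = [False] * n
--     mex = 0
--     acc = 0
--     out = []
--     for i in range(n):
--         seen[a[i]] = True
--         while mex < n and seen[mex]:
--             mex += 1
--         acc += mex
--         out.append(acc)
--     return out
-- ===== Notes on version B (the rewrite author's own statement) =====
-- stated objective: simpler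
-- what changed: Replaces the union-find vis-array MEX machinery plus three prefix/suffix recombination passes by a single pass with a boolean seen-array and a monotone mex pointer, using the identity that A's pres/sufs/ans combination cancels back to the running prefix-mex sums ps.
-- outside the precondition, e.g. on solve(2, [-1, 0]): A returns [0, 1], B returns [0, 2]
import Mathlib
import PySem

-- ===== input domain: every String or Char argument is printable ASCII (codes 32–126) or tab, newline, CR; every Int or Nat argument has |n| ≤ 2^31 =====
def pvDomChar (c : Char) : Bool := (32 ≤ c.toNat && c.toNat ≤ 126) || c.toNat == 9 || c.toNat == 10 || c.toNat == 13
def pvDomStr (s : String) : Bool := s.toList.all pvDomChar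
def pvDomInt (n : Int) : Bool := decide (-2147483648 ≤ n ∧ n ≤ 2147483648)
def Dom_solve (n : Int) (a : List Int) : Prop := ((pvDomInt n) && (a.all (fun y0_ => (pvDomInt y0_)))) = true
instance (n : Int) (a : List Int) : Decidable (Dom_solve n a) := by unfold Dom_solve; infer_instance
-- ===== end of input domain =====

-- B replaces A's union-find MEX machinery and its three prefix/suffix recombination
-- passes by one pass with a boolean seen-array and a monotone mex pointer (objective: simpler).

-- ===== PORT A =====
-- xs[i] for a known-nonnegative in-range index (loop counters); exact there
def pvG (xs : List Int) (i : Nat) : Int := xs.getD i 0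

-- xs[i] for a value-derived index, Python semantics (negative wrap; default where Python raises)
def pvGI (xs : List Int) (i : Int) : Int := PySem.List.pyGetD xs i 0

-- the 'while vis[v] != v: stk.append(v); v = vis[v]' loop (fuel ≥ len+1 suffices under Pre_solve)
def pvChase (vis : List Int) : Nat → Int → List Int → Int × List Int
  | 0, v, stk => (v, stk)
  | fuel+1, v, stk =>
      if pvGI vis v = v then (v, stk)
      else pvChase vis fuel (pvGI vis v) (stk ++ [v])

-- insert x: 'vis[x] = x; if x < n-1 and vis[x+1] >= 0: ...; if x and vis[x-1] >= 0: ...'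
def pvInsert (n : Int) (vis : List Int) (x : Int) : List Int :=
  let vis := PySem.List.pySetD vis x x
  let vis := if x < n - 1 ∧ 0 ≤ pvGI vis (x+1) then PySem.List.pySetD vis x (pvGI vis (x+1)) else vis
  if x ≠ 0 ∧ 0 ≤ pvGI vis (x-1) then PySem.List.pySetD vis (x-1) (pvGI vis x) else vis

-- 'mex = 0; if vis[mex] >= 0: chase to the root, compress the stack, mex = v + 1'
def pvMex (vis : List Int) : List Int × Int :=
  if 0 ≤ pvG vis 0 then
    let c := pvChase vis (vis.length + 1) 0 []
    (c.2.foldl (fun vs u => PySem.List.pySetD vs u c.1) vis, c.1 + 1)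
  else (vis, 0)

-- one iteration of A's first loop over i
def pvStepA (n : Int) (a : List Int) (s : List Int × List Int) (i : Nat) : List Int × List Int :=
  let t := pvMex (pvInsert n s.1 (pvG a i))
  (t.1, s.2.set i (t.2 + if i ≠ 0 then pvG s.2 (i-1) else 0))

-- pres[i] = ps[i] (+ pres[i-1])
def pvStepPres (ps : List Int) (pres : List Int) (i : Nat) : List Int :=
  pres.set i (pvG ps i + if i ≠ 0 then pvG pres (i-1) else 0)

-- sufs[i] = pres[-1] (- pres[i-1])
def pvStepSufs (pres : List Int) (sufs : List Int) (i : Nat) : List Int :=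
  sufs.set i (pvG pres (pres.length - 1) - if i ≠ 0 then pvG pres (i-1) else 0)

-- ans[i] = pres[-1] (- pres[i-1]) (- sufs[i+1])
def pvStepAns (n : Int) (pres sufs : List Int) (ans : List Int) (i : Nat) : List Int :=
  ans.set i (pvG pres (pres.length - 1) - (if i ≠ 0 then pvG pres (i-1) else 0)
              - (if (i : Int) < n - 1 then pvG sufs (i+1) else 0))

def solve (n : Int) (a : List Int) : List Int :=
  let n' := n.toNat
  let s := (List.range n').foldl (pvStepA n a) (List.replicate n' (-1), List.replicate n' 0)
  let pres := (List.range n').foldl (pvStepPres s.2) (List.replicate n' 0)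
  let sufs := (List.range n').foldl (pvStepSufs pres) s.2
  (List.range n').foldl (pvStepAns n pres sufs) s.1

-- ===== PORT B =====
-- the 'while mex < n and seen[mex]: mex += 1' loop (fuel ≥ len+1 suffices)
def pvAdvance (seen : List Bool) (n : Int) : Nat → Int → Int
  | 0, mex => mex
  | fuel+1, mex => if mex < n ∧ seen.getD mex.toNat false then pvAdvance seen n fuel (mex + 1) else mex

def pvStepB (n : Int) (a : List Int) (s : List Bool × Int × Int × List Int) (i : Nat) :
    List Bool × Int × Int × List Int :=
  let seen := PySem.List.pySetD s.1 (pvG a i) true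
  let mex := pvAdvance seen n (seen.length + 1) s.2.1
  let acc := s.2.2.1 + mex
  (seen, mex, acc, s.2.2.2 ++ [acc])

def solve_alt (n : Int) (a : List Int) : List Int :=
  ((List.range n.toNat).foldl (pvStepB n a) (List.replicate n.toNat false, 0, 0, [])).2.2.2

-- ===== PRECONDITION & SPEC =====
-- Pre_ excludes inputs with some a[i] (i < n) outside [0, n): there Python either raises
-- IndexError or silently wraps negative indices, so both implementations' values are
-- accidental artefacts of their array layouts; such values never occur in the problem.
def Pre_solve (n : Int) (a : List Int) : Prop :=
  n ≤ (a.length : Int) ∧ ∀ x ∈ a.take n.toNat, 0 ≤ x ∧ x < n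
instance (n : Int) (a : List Int) : Decidable (Pre_solve n a) := by unfold Pre_solve; infer_instance

def pvWitness_solve : Int × List Int := (3, [1, 0, 2])

def Spec_solve (n : Int) (a : List Int) (out : List Int) : Prop := out = solve_alt n a
instance (n : Int) (a : List Int) (out : List Int) : Decidable (Spec_solve n a out) := by unfold Spec_solve; infer_instance

-- ===== CLAIM (what is proved, stated in full; the proofs are below) =====
def Claim_equal_solve : Prop := ∀ (n : Int) (a : List Int), Dom_solve n a → Pre_solve n a → Spec_solve n a (solve n a)

-- ===== LEMMAS AND PROOFS =====

-- bridges from the Python-exact primitives to plain getD/set at in-range Nat indices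
theorem pvGI_nat (xs : List Int) (j : Nat) : pvGI xs (j : Int) = pvG xs j := by
  simp [pvGI, pvG, PySem.List.pyGetD_natCast]

theorem pySetD_nat {α : Type} (xs : List α) (j : Nat) (v : α) (h : j < xs.length) :
    PySem.List.pySetD xs (j : Int) v = xs.set j v := by
  simp [PySem.List.pySetD, PySem.List.pySet?_natCast xs j v h]

-- xs.set through getD
theorem pvGsetL (xs : List Int) (i j : Nat) (v : Int) :
    pvG (xs.set i v) j = if i = j ∧ i < xs.length then v else pvG xs j := by
  simp [pvG, List.getD_eq_getElem?_getD, List.getElem?_set]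
  split_ifs with h1 h2 h3 <;> simp_all <;> omega

theorem gsetB (xs : List Bool) (i j : Nat) (v : Bool) :
    (xs.set i v).getD j false = if i = j ∧ i < xs.length then v else xs.getD j false := by
  simp [List.getD_eq_getElem?_getD, List.getElem?_set]
  split_ifs with h1 h2 h3 <;> simp_all <;> omega

-- first index holding false (the MEX of the seen-set)
def ff : List Bool → Nat
  | [] => 0
  | b :: t => if b then ff t + 1 else 0

theorem ff_le (s : List Bool) : ff s ≤ s.length := by
  induction s with
  | nil => simp [ff]
  | cons b t ih => by_cases h : b <;> simp [ff, h] <;> omega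

theorem ff_lt_true (s : List Bool) (j : Nat) (h : j < ff s) : s.getD j false = true := by
  induction s generalizing j with
  | nil => simp [ff] at h
  | cons b t ih =>
    by_cases hb : b
    · cases j with
      | zero => simpa [hb]
      | succ j => simp [ff, hb] at h; simpa using ih j (by omega)
    · simp [ff, hb] at h

theorem ff_false (s : List Bool) (h : ff s < s.length) : s.getD (ff s) false = false := by
  induction s with
  | nil => simp at h
  | cons b t ih =>
    by_cases hb : b
    · simp [ff, hb] at h ⊢; simpa using ih (by omega)
    · simp [ff, hb]

theorem ff_eq_of (s : List Bool) (m : Nat) (hm : m ≤ s.length)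
    (h1 : ∀ j, j < m → s.getD j false = true)
    (h2 : m = s.length ∨ s.getD m false = false) : ff s = m := by
  by_contra hne
  rcases Nat.lt_or_ge (ff s) m with h | h
  · have := ff_false s (by omega)
    have := h1 (ff s) h
    simp_all
  · have hlt : m < ff s := by omega
    have := ff_lt_true s m hlt
    have := ff_le s
    rcases h2 with h2 | h2 <;> simp_all <;> omega

-- union-find invariant: vis marks exactly the seen values; every seen v points (weakly increasing)
-- into its contiguous seen run, and is a fixpoint exactly when v+1 is unseen
def UFInv (vis : List Int) (seen : List Bool) : Prop :=
  vis.length = seen.length ∧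
  ∀ v : Nat, v < seen.length →
    ((0 ≤ pvG vis v ↔ seen.getD v false = true) ∧
     (seen.getD v false = true →
       ((v : Int) ≤ pvG vis v ∧ pvG vis v < (seen.length : Int) ∧
        (∀ u : Nat, v ≤ u → (u : Int) ≤ pvG vis v → seen.getD u false = true) ∧
        (pvG vis v = (v : Int) ↔ ¬ (v + 1 < seen.length ∧ seen.getD (v + 1) false = true)))))

theorem UF_init (n' : Nat) : UFInv (List.replicate n' (-1)) (List.replicate n' false) := by
  refine ⟨by simp, ?_⟩
  intro v hv
  simp only [List.length_replicate] at hv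
  have h1 : pvG (List.replicate n' (-1)) v = -1 := by
    simp [pvG, List.getD_eq_getElem?_getD, hv]
  have h2 : (List.replicate n' false).getD v false = false := by
    simp [List.getD_eq_getElem?_getD, hv]
  rw [h1, h2]
  exact ⟨by simp, by simp⟩

-- overwriting a seen u with the top r of its run preserves the invariant
theorem UF_set_root (vis : List Int) (seen : List Bool) (u r : Nat)
    (hI : UFInv vis seen) (hu : u < seen.length) (hur : u ≤ r) (hr : r < seen.length)
    (hiv : ∀ w : Nat, u ≤ w → w ≤ r → seen.getD w false = true)
    (hroot : ¬ (r + 1 < seen.length ∧ seen.getD (r + 1) false = true)) :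
    UFInv (vis.set u (r : Int)) seen := by
  obtain ⟨hlen, hI⟩ := hI
  refine ⟨by simpa using hlen, ?_⟩
  intro v hv
  by_cases hvu : u = v
  · subst hvu
    have hset : pvG (vis.set u (r : Int)) u = (r : Int) := by
      rw [pvGsetL, if_pos ⟨rfl, by omega⟩]
    rw [hset]
    have hs : seen.getD u false = true := hiv u le_rfl hur
    refine ⟨iff_of_true (Int.natCast_nonneg r) hs, fun _ => ⟨by exact_mod_cast hur, by exact_mod_cast hr, ?_, ?_⟩⟩
    · intro w hw1 hw2
      exact hiv w hw1 (by exact_mod_cast hw2)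
    · constructor
      · intro h
        have hru : r = u := by exact_mod_cast h
        subst hru
        exact hroot
      · intro h
        have hru : r = u := by
          by_contra hne
          exact h ⟨by omega, hiv (u+1) (by omega) (by omega)⟩
        simp [hru]
  · have hset : pvG (vis.set u (r : Int)) v = pvG vis v := by
      rw [pvGsetL, if_neg (by tauto)]
    rw [hset]
    exact hI v hv

-- the chase loop reaches the top of the run; the stack collects strictly smaller run members
theorem chase_spec (vis : List Int) (seen : List Bool) (hI : UFInv vis seen) :
    ∀ (fuel : Nat) (v : Nat) (stk : List Int), v < seen.length →
      seen.getD v false = true → seen.length - v < fuel →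
      ∃ (r : Nat) (ext : List Int),
        pvChase vis fuel (v : Int) stk = ((r : Int), stk ++ ext) ∧
        v ≤ r ∧ r < seen.length ∧
        (∀ u : Nat, v ≤ u → u ≤ r → seen.getD u false = true) ∧
        ¬ (r + 1 < seen.length ∧ seen.getD (r + 1) false = true) ∧
        (∀ w ∈ ext, ∃ wn : Nat, w = (wn : Int) ∧ v ≤ wn ∧ wn < r ∧ wn < seen.length) := by
  obtain ⟨hlen, hInv⟩ := hI
  intro fuel
  induction fuel with
  | zero => intro v stk hv _ hf; omega
  | succ f ih =>
    intro v stk hv hs hf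
    obtain ⟨hiff, hrun⟩ := hInv v hv
    obtain ⟨hle, hlt, hint, hfix⟩ := hrun hs
    by_cases hvfix : pvG vis v = (v : Int)
    · refine ⟨v, [], ?_, le_rfl, hv, ?_, ?_, by simp⟩
      · rw [pvChase, pvGI_nat, if_pos hvfix]
        simp
      · intro u h1 h2; have : u = v := by omega
        rw [this]; exact hs
      · exact hfix.mp hvfix
    ·
      have hplt : (v : Int) < pvG vis v := lt_of_le_of_ne hle (by intro h; exact hvfix h.symm)
      set p := pvG vis v with hp
      have hp0 : 0 ≤ p := le_trans (by exact_mod_cast Nat.zero_le v) hle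
      obtain ⟨pn, hpn⟩ : ∃ pn : Nat, p = (pn : Int) := ⟨p.toNat, by omega⟩
      have hpnlt : pn < seen.length := by rw [hpn] at hlt; exact_mod_cast hlt
      have hpns : seen.getD pn false = true := hint pn (by omega) (by omega)
      have hrec := ih pn (stk ++ [(v : Int)]) hpnlt hpns (by omega)
      obtain ⟨r, ext, heq, h1, h2, h3, h4, h5⟩ := hrec
      refine ⟨r, (v : Int) :: ext, ?_, by omega, h2, ?_, h4, ?_⟩
      · rw [pvChase, pvGI_nat, ← hp, if_neg hvfix, hpn, heq]
        simp
      · intro u hu1 hu2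
        rcases Nat.lt_or_ge u pn with h | h
        · exact hint u hu1 (by rw [hpn]; exact_mod_cast by omega)
        · exact h3 u h hu2
      · intro w hw
        rcases List.mem_cons.mp hw with hw | hw
        · exact ⟨v, by simp [hw], le_rfl, by omega, hv⟩
        · obtain ⟨wn, hw1, hw2, hw3, hw4⟩ := h5 w hw
          exact ⟨wn, hw1, by omega, hw3, hw4⟩

-- path compression: pointing every stack member at the run top preserves the invariant
theorem UF_compress (seen : List Bool) (r : Nat) (hr : r < seen.length)
    (hiv : ∀ w : Nat, w ≤ r → seen.getD w false = true)
    (hroot : ¬ (r + 1 < seen.length ∧ seen.getD (r + 1) false = true)) :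
    ∀ (stk : List Int) (vis : List Int), UFInv vis seen →
      (∀ w ∈ stk, ∃ wn : Nat, w = (wn : Int) ∧ wn < r ∧ wn < seen.length) →
      UFInv (stk.foldl (fun vs u => PySem.List.pySetD vs u (r : Int)) vis) seen := by
  intro stk
  induction stk with
  | nil => intro vis hI _; simpa using hI
  | cons w t ih =>
    intro vis hI hstk
    obtain ⟨wn, hw1, hw2, hw3⟩ := hstk w (by simp)
    simp only [List.foldl_cons]
    rw [hw1, pySetD_nat vis wn (r : Int) (by rw [hI.1]; exact hw3)]
    refine ih (vis.set wn (r : Int)) ?_ (fun x hx => hstk x (by simp [hx]))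
    exact UF_set_root vis seen wn r hI hw3 (by omega) hr (fun u _ hu2 => hiv u hu2) hroot

-- A's mex computation returns ff seen and keeps the invariant
theorem pvMex_spec (vis : List Int) (seen : List Bool) (hI : UFInv vis seen)
    (hn : 0 < seen.length) :
    UFInv (pvMex vis).1 seen ∧ (pvMex vis).2 = (ff seen : Int) := by
  have hlen := hI.1
  by_cases h0 : 0 ≤ pvG vis 0
  · have hs0 : seen.getD 0 false = true := ((hI.2 0 hn).1).mp h0
    obtain ⟨r, ext, heq, _, hrlt, hint, hroot, hext⟩ :=
      chase_spec vis seen hI (vis.length + 1) 0 [] hn hs0 (by omega)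
    have hff : ff seen = r + 1 := by
      refine ff_eq_of seen (r+1) (by omega) (fun j hj => hint j (by omega) (by omega)) ?_
      by_cases hc : r + 1 < seen.length
      · right
        rcases Bool.eq_false_or_eq_true (seen.getD (r+1) false) with h | h
        · exact absurd ⟨hc, h⟩ hroot
        · exact h
      · left; omega
    rw [pvMex, if_pos h0]
    have h00 : ((0:Nat) : Int) = (0 : Int) := rfl
    rw [← h00, heq]
    simp only []
    constructor
    · refine UF_compress seen r hrlt (fun w hw => hint w (by omega) hw) hroot ext vis hI ?_
      intro w hw
      obtain ⟨wn, h1, _, h3, h4⟩ := hext w hw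
      exact ⟨wn, h1, h3, h4⟩
    · rw [hff]; push_cast; ring
  · have hs0 : seen.getD 0 false = false := by
      rcases Bool.eq_false_or_eq_true (seen.getD 0 false) with h | h
      · exact absurd ((hI.2 0 hn).1.mpr h) h0
      · exact h
    have hff : ff seen = 0 := ff_eq_of seen 0 (by omega) (by omega) (Or.inr hs0)
    rw [pvMex, if_neg h0]
    exact ⟨hI, by simp [hff]⟩

-- helper getD facts for the seen-array after marking x
theorem gset_keep (seen : List Bool) (x j : Nat) (h : seen.getD j false = true) :
    (seen.set x true).getD j false = true := by
  rw [gsetB]; split_ifs <;> simp_all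

theorem gset_other (seen : List Bool) (x j : Nat) (h : j ≠ x) :
    (seen.set x true).getD j false = seen.getD j false := by
  rw [gsetB]; split_ifs with hc
  · exact absurd hc.1.symm h
  · rfl

theorem gset_self (seen : List Bool) (x : Nat) (h : x < seen.length) :
    (seen.set x true).getD x false = true := by
  rw [gsetB]; simp [h]

-- inserting x with final pointer value w (to x itself or into the run above) keeps the invariant
theorem UF_insert_general (vis : List Int) (seen : List Bool) (x : Nat) (w : Int) (b3 : Bool)
    (hI : UFInv vis seen) (hx : x < seen.length)
    (hwl : (x : Int) ≤ w) (hwh : w < (seen.length : Int))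
    (hint : ∀ u : Nat, x ≤ u → (u : Int) ≤ w → u = x ∨ seen.getD u false = true)
    (hfix : w = (x : Int) ↔ ¬ (x + 1 < seen.length ∧ seen.getD (x + 1) false = true))
    (hb3 : b3 = true ↔ (x ≠ 0 ∧ seen.getD (x - 1) false = true)) :
    UFInv (if b3 then (vis.set x w).set (x-1) w else vis.set x w) (seen.set x true) := by
  obtain ⟨hlen, hInv⟩ := hI
  have hlen' : (if b3 then (vis.set x w).set (x-1) w else vis.set x w).length = (seen.set x true).length := by
    split_ifs <;> simp [hlen]
  refine ⟨hlen', ?_⟩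
  intro v hv
  simp only [List.length_set] at hv
  have hs' : ∀ j : Nat, (seen.set x true).getD j false = (if j = x then true else seen.getD j false) := by
    intro j
    split_ifs with h
    · subst h; exact gset_self seen j hx
    · exact gset_other seen x j h
  -- the goal clause at a position whose pointer is w and whose mark in seen' is true
  have hclauseW : ∀ v' : Nat, v' ≤ x → ((x:Int) - 1) ≤ v' → v' < seen.length →
      (v' = x ∨ seen.getD v' false = true) →
      ((0 ≤ w ↔ (seen.set x true).getD v' false = true) ∧
       ((seen.set x true).getD v' false = true →
         ((v' : Int) ≤ w ∧ w < ((seen.set x true).length : Int) ∧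
          (∀ u : Nat, v' ≤ u → (u : Int) ≤ w → (seen.set x true).getD u false = true) ∧
          (w = (v' : Int) ↔ ¬ (v' + 1 < (seen.set x true).length ∧ (seen.set x true).getD (v' + 1) false = true))))) := by
    intro v' hv'x hv'x2 hv'lt hmark
    have hmark' : (seen.set x true).getD v' false = true := by
      rcases hmark with h | h
      · subst h; exact gset_self seen v' hx
      · exact gset_keep seen x v' h
    refine ⟨iff_of_true (by omega) hmark', fun _ => ⟨by omega, by simp; omega, ?_, ?_⟩⟩
    · intro u hu1 hu2
      by_cases hux : u = x
      · subst hux; exact gset_self seen u hx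
      · rcases Nat.lt_or_ge u x with h | h
        · have huv : u = v' := by omega
          subst huv
          rcases hmark with h' | h'
          · exact absurd h' hux
          · exact gset_keep seen x u h'
        · rcases hint u h hu2 with h' | h'
          · exact absurd h' hux
          · exact gset_keep seen x u h'
    · simp only [List.length_set]
      by_cases hv'eq : v' = x
      · subst hv'eq
        rw [hs' (v'+1), if_neg (by omega)]
        exact hfix
      · have hv'1 : v' + 1 = x := by omega
        rw [iff_false_intro (show ¬ (w = (v' : Int)) by omega), false_iff, not_not, hv'1,
          hs' x, if_pos rfl]
        exact ⟨by omega, rfl⟩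
  -- the goal clause at an untouched position
  have hclauseO : ∀ v' : Nat, v' < seen.length → v' ≠ x → ¬ (b3 = true ∧ v' = x - 1) →
      ((0 ≤ pvG vis v' ↔ (seen.set x true).getD v' false = true) ∧
       ((seen.set x true).getD v' false = true →
         ((v' : Int) ≤ pvG vis v' ∧ pvG vis v' < ((seen.set x true).length : Int) ∧
          (∀ u : Nat, v' ≤ u → (u : Int) ≤ pvG vis v' → (seen.set x true).getD u false = true) ∧
          (pvG vis v' = (v' : Int) ↔ ¬ (v' + 1 < (seen.set x true).length ∧ (seen.set x true).getD (v' + 1) false = true))))) := by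
    intro v' hv'lt hv'x hv'b
    rw [hs' v', if_neg hv'x]
    obtain ⟨hiff, hrun⟩ := hInv v' hv'lt
    refine ⟨hiff, fun hsv => ?_⟩
    obtain ⟨h1, h2, h3, h4⟩ := hrun hsv
    simp only [List.length_set]
    refine ⟨h1, h2, fun u hu1 hu2 => gset_keep seen x u (h3 u hu1 hu2), ?_⟩
    by_cases hvx1 : v' + 1 = x
    · exfalso
      exact hv'b ⟨hb3.mpr ⟨by omega, by rw [show x - 1 = v' by omega]; exact hsv⟩, by omega⟩
    · rw [hs' (v'+1), if_neg hvx1]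
      exact h4
  by_cases hb : b3 = true
  · rw [if_pos hb]
    obtain ⟨hx0, hsxm⟩ := hb3.mp hb
    by_cases hvm : v = x - 1
    · have hg : pvG ((vis.set x w).set (x-1) w) v = w := by
        rw [pvGsetL, if_pos ⟨hvm.symm, by simp [hlen]; omega⟩]
      rw [hg]
      exact hclauseW v (by omega) (by omega) hv (Or.inr (hvm ▸ hsxm))
    · by_cases hvx : v = x
      · have hg : pvG ((vis.set x w).set (x-1) w) v = w := by
          rw [pvGsetL, if_neg (by rintro ⟨h, _⟩; exact hvm h.symm), pvGsetL,
            if_pos ⟨hvx.symm, by omega⟩]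
        rw [hg]
        exact hclauseW v (by omega) (by omega) hv (Or.inl hvx)
      · have hg : pvG ((vis.set x w).set (x-1) w) v = pvG vis v := by
          rw [pvGsetL, if_neg (by rintro ⟨h, _⟩; exact hvm h.symm), pvGsetL,
            if_neg (by rintro ⟨h, _⟩; exact hvx h.symm)]
        rw [hg]
        exact hclauseO v hv hvx (by rintro ⟨_, h⟩; exact hvm h)
  · rw [if_neg hb]
    by_cases hvx : v = x
    · have hg : pvG (vis.set x w) v = w := by
        rw [pvGsetL, if_pos ⟨hvx.symm, by omega⟩]
      rw [hg]
      exact hclauseW v (by omega) (by omega) hv (Or.inl hvx)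
    · have hg : pvG (vis.set x w) v = pvG vis v := by
        rw [pvGsetL, if_neg (by rintro ⟨h, _⟩; exact hvx h.symm)]
      rw [hg]
      exact hclauseO v hv hvx (by rintro ⟨h, _⟩; exact hb h)

-- A's three insertion lines, characterized through UF_insert_general
theorem pvInsert_spec (n : Int) (vis : List Int) (seen : List Bool) (x : Nat)
    (hI : UFInv vis seen) (hx : x < seen.length)
    (hlen_n : seen.length = n.toNat) (hn : 1 ≤ n) :
    UFInv (pvInsert n vis (x : Int)) (seen.set x true) := by
  have hlen := hI.1
  have hnlen : (seen.length : Int) = n := by omega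
  have hb0 : PySem.List.pySetD vis ((x : Nat) : Int) (x : Int) = vis.set x (x : Int) :=
    pySetD_nat vis x _ (by omega)
  have he1 : ((x : Int) + 1) = (((x + 1 : Nat)) : Int) := by push_cast; ring
  have hgx1 : pvGI (vis.set x (x : Int)) ((x : Int) + 1) = pvG vis (x+1) := by
    rw [he1, pvGI_nat, pvGsetL, if_neg (by omega)]
  have hc2iff : ((x : Int) < n - 1 ∧ 0 ≤ pvGI (vis.set x (x : Int)) ((x : Int) + 1)) ↔
      (x + 1 < seen.length ∧ seen.getD (x+1) false = true) := by
    rw [hgx1]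
    constructor
    · rintro ⟨h1, h2⟩
      have hlt : x + 1 < seen.length := by omega
      exact ⟨hlt, (hI.2 (x+1) hlt).1.mp h2⟩
    · rintro ⟨h1, h2⟩
      exact ⟨by omega, (hI.2 (x+1) h1).1.mpr h2⟩
  set w : Int := if x + 1 < seen.length ∧ seen.getD (x+1) false = true then pvG vis (x+1) else (x : Int) with hw
  have hvis2 : (if (x : Int) < n - 1 ∧ 0 ≤ pvGI (vis.set x (x : Int)) ((x : Int) + 1)
        then PySem.List.pySetD (vis.set x (x : Int)) ((x : Nat) : Int) (pvGI (vis.set x (x : Int)) ((x : Int) + 1))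
        else vis.set x (x : Int)) = vis.set x w := by
    by_cases hc : (x : Int) < n - 1 ∧ 0 ≤ pvGI (vis.set x (x : Int)) ((x : Int) + 1)
    · rw [if_pos hc, hgx1, pySetD_nat _ x _ (by simp; omega), List.set_set, hw,
        if_pos (hc2iff.mp hc)]
    · rw [if_neg hc, hw, if_neg (fun h => hc (hc2iff.mpr h))]
  have hgw : pvG (vis.set x w) x = w := by
    rw [pvGsetL, if_pos ⟨rfl, by omega⟩]
  have hEq : pvInsert n vis (x : Int) =
      if decide (x ≠ 0 ∧ seen.getD (x-1) false = true) then (vis.set x w).set (x-1) w else vis.set x w := by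
    show (let vis1 := PySem.List.pySetD vis ((x : Int)) (x : Int);
          let vis2 := if (x : Int) < n - 1 ∧ 0 ≤ pvGI vis1 ((x : Int) + 1)
                      then PySem.List.pySetD vis1 ((x : Int)) (pvGI vis1 ((x : Int) + 1)) else vis1;
          if (x : Int) ≠ 0 ∧ 0 ≤ pvGI vis2 ((x : Int) - 1)
          then PySem.List.pySetD vis2 ((x : Int) - 1) (pvGI vis2 ((x : Int))) else vis2) = _
    simp only [hb0, hvis2]
    by_cases hx0 : x = 0
    · subst hx0
      rw [if_neg (by push_cast; simp), if_neg (by simp)]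
    · have he2 : ((x : Int) - 1) = (((x - 1 : Nat)) : Int) := by omega
      have hgxm : pvGI (vis.set x w) ((x : Int) - 1) = pvG vis (x-1) := by
        rw [he2, pvGI_nat, pvGsetL, if_neg (by omega)]
      have hc3iff : ((x : Int) ≠ 0 ∧ 0 ≤ pvGI (vis.set x w) ((x : Int) - 1)) ↔
          (x ≠ 0 ∧ seen.getD (x-1) false = true) := by
        rw [hgxm]
        constructor
        · rintro ⟨h1, h2⟩
          exact ⟨hx0, (hI.2 (x-1) (by omega)).1.mp h2⟩
        · rintro ⟨h1, h2⟩
          exact ⟨by omega, (hI.2 (x-1) (by omega)).1.mpr h2⟩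
      by_cases hc : (x : Int) ≠ 0 ∧ 0 ≤ pvGI (vis.set x w) ((x : Int) - 1)
      · rw [if_pos hc, if_pos (by simp only [decide_eq_true_eq]; exact hc3iff.mp hc), he2,
          pySetD_nat _ (x-1) _ (by simp; omega)]
        have hgwI : pvGI (vis.set x w) ((x : Int)) = w := by
          rw [pvGI_nat, hgw]
        rw [hgwI]
      · rw [if_neg hc, if_neg (by simp only [decide_eq_true_eq]; exact fun h => hc (hc3iff.mpr h))]
  rw [hEq]
  by_cases hc2 : x + 1 < seen.length ∧ seen.getD (x+1) false = true
  · obtain ⟨hrl, hrh, hri, hrf⟩ := (hI.2 (x+1) hc2.1).2 hc2.2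
    have hwval : w = pvG vis (x+1) := by rw [hw, if_pos hc2]
    refine UF_insert_general vis seen x w _ ⟨hlen, hI.2⟩ hx ?_ ?_ ?_ ?_ (by simp)
    · rw [hwval]; push_cast at hrl ⊢; omega
    · rw [hwval]; exact hrh
    · intro u hu1 hu2
      by_cases hux : u = x
      · exact Or.inl hux
      · exact Or.inr (hri u (by omega) (by rw [hwval] at hu2; exact hu2))
    · rw [hwval]
      constructor
      · intro h; exfalso; push_cast at hrl; omega
      · intro h; exact absurd hc2 h
  · have hwval : w = (x : Int) := by rw [hw, if_neg hc2]
    refine UF_insert_general vis seen x w _ ⟨hlen, hI.2⟩ hx (by omega) (by omega) ?_ ?_ (by simp)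
    · intro u hu1 hu2
      left; omega
    · rw [hwval]
      exact iff_of_true rfl hc2

theorem ff_ge_of (s : List Bool) (m : Nat) (hm : m ≤ s.length)
    (h : ∀ j, j < m → s.getD j false = true) : m ≤ ff s := by
  by_contra hlt
  have h1 := ff_false s (by omega)
  have h2 := h (ff s) (by omega)
  simp_all

theorem ff_set_true_le (s : List Bool) (x : Nat) : ff s ≤ ff (s.set x true) := by
  refine ff_ge_of (s.set x true) (ff s) (by simpa using ff_le s) ?_
  intro j hj
  exact gset_keep s x j (ff_lt_true s j hj)

-- the 'while mex < n and seen[mex]' pointer lands exactly on ff seen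
theorem pvAdvance_spec (s : List Bool) (n : Int) (hlen : (s.length : Int) = n) :
    ∀ (fuel : Nat) (m : Int), 0 ≤ m → m.toNat ≤ ff s → ff s - m.toNat < fuel →
      pvAdvance s n fuel m = (ff s : Int) := by
  intro fuel
  induction fuel with
  | zero => intro m _ _ h; omega
  | succ f ih =>
    intro m hm0 hmf hf
    rcases Nat.lt_or_ge m.toNat (ff s) with h | h
    · have hs : s.getD m.toNat false = true := ff_lt_true s m.toNat h
      have hmn : m < n := by
        have := ff_le s
        omega
      rw [pvAdvance, if_pos ⟨hmn, hs⟩]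
      exact ih (m+1) (by omega) (by omega) (by omega)
    · have hmeq : m.toNat = ff s := by omega
      rw [pvAdvance]
      rw [if_neg ?_]
      · omega
      · rintro ⟨h1, h2⟩
        have hlt : m.toNat < s.length := by omega
        rw [hmeq] at h2
        have := ff_false s (by omega)
        simp_all

theorem ff_replicate_false (n' : Nat) : ff (List.replicate n' false) = 0 := by
  cases n' with
  | zero => rfl
  | succ m => simp [List.replicate_succ, ff]

theorem take_set_succ (l : List Int) (k : Nat) (v : Int) (h : k < l.length) :
    (l.set k v).take (k+1) = l.take k ++ [v] := by
  apply List.ext_getElem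
  · simp
    omega
  · intro i hi1 hi2
    simp only [List.getElem_take, List.getElem_set]
    rcases Nat.lt_or_ge i k with hik | hik
    · rw [if_neg (by omega), List.getElem_append_left (by simp; omega)]
      simp
    · have hieq : i = k := by
        simp only [List.length_take, List.length_set] at hi1
        omega
      subst hieq
      rw [if_pos rfl, List.getElem_append_right (by simp)]
      simp

-- joint invariant of A's first loop and B's loop
theorem mainloop (n : Int) (a : List Int)
    (hpre : ∀ i : Nat, i < n.toNat → 0 ≤ pvG a i ∧ pvG a i < n) :
    ∀ k, k ≤ n.toNat →
      (UFInv ((List.range k).foldl (pvStepA n a) (List.replicate n.toNat (-1), List.replicate n.toNat 0)).1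
             ((List.range k).foldl (pvStepB n a) (List.replicate n.toNat false, 0, 0, [])).1) ∧
      ((List.range k).foldl (pvStepB n a) (List.replicate n.toNat false, 0, 0, [])).1.length = n.toNat ∧
      ((List.range k).foldl (pvStepA n a) (List.replicate n.toNat (-1), List.replicate n.toNat 0)).2.length = n.toNat ∧
      ((List.range k).foldl (pvStepB n a) (List.replicate n.toNat false, 0, 0, [])).2.1 =
        (ff ((List.range k).foldl (pvStepB n a) (List.replicate n.toNat false, 0, 0, [])).1 : Int) ∧
      ((List.range k).foldl (pvStepB n a) (List.replicate n.toNat false, 0, 0, [])).2.2.2 =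
        ((List.range k).foldl (pvStepA n a) (List.replicate n.toNat (-1), List.replicate n.toNat 0)).2.take k ∧
      ((List.range k).foldl (pvStepB n a) (List.replicate n.toNat false, 0, 0, [])).2.2.1 =
        (if k = 0 then 0 else pvG ((List.range k).foldl (pvStepA n a) (List.replicate n.toNat (-1), List.replicate n.toNat 0)).2 (k-1)) := by
  intro k
  induction k with
  | zero =>
    intro _
    simp only [List.range_zero, List.foldl_nil]
    exact ⟨UF_init n.toNat, by simp, by simp, by simp [ff_replicate_false], by simp, by simp⟩
  | succ k ih =>
    intro hk1
    obtain ⟨hInv, hBlen, hAlen, hmex, hout, hacc⟩ := ih (by omega)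
    set sA := (List.range k).foldl (pvStepA n a) (List.replicate n.toNat (-1), List.replicate n.toNat 0) with hsA
    set sB := (List.range k).foldl (pvStepB n a) (List.replicate n.toNat false, 0, 0, []) with hsB
    have hn1 : 1 ≤ n := by omega
    have hnn : ((n.toNat : Nat) : Int) = n := by omega
    obtain ⟨hx0, hxn⟩ := hpre k (by omega)
    have hxlt : (pvG a k).toNat < n.toNat := by omega
    have hA1 : (List.range (k+1)).foldl (pvStepA n a) (List.replicate n.toNat (-1), List.replicate n.toNat 0) = pvStepA n a sA k := by
      rw [List.range_succ, List.foldl_append, ← hsA]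
      simp only [List.foldl_cons, List.foldl_nil]
    have hB1 : (List.range (k+1)).foldl (pvStepB n a) (List.replicate n.toNat false, 0, 0, []) = pvStepB n a sB k := by
      rw [List.range_succ, List.foldl_append, ← hsB]
      simp only [List.foldl_cons, List.foldl_nil]
    rw [hA1, hB1]
    have hsetbr : PySem.List.pySetD sB.1 (pvG a k) true = sB.1.set (pvG a k).toNat true := by
      conv_lhs => rw [show pvG a k = (((pvG a k).toNat : Nat) : Int) by omega]
      exact pySetD_nat sB.1 (pvG a k).toNat true (by omega)
    set seen' := sB.1.set (pvG a k).toNat true with hseen'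
    have hseenlen : seen'.length = n.toNat := by simp [hseen', hBlen]
    have hIns : UFInv (pvInsert n sA.1 (pvG a k)) seen' := by
      rw [show pvG a k = (((pvG a k).toNat : Nat) : Int) by omega, hseen']
      exact pvInsert_spec n sA.1 sB.1 (pvG a k).toNat hInv (by omega) (by omega) hn1
    have hMex := pvMex_spec (pvInsert n sA.1 (pvG a k)) seen' hIns (by omega)
    have hAdv : pvAdvance seen' n (seen'.length + 1) sB.2.1 = (ff seen' : Int) := by
      refine pvAdvance_spec seen' n (by omega) (seen'.length + 1) sB.2.1 (by rw [hmex]; omega) ?_ ?_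
      · rw [hmex]
        simp only [Int.toNat_natCast]
        rw [hseen']
        exact ff_set_true_le sB.1 (pvG a k).toNat
      · have := ff_le seen'
        omega
    have hcomm : (if k = 0 then (0:Int) else pvG sA.2 (k-1)) + (ff seen' : Int) =
        (ff seen' : Int) + (if k ≠ 0 then pvG sA.2 (k-1) else 0) := by
      by_cases hk : k = 0
      · rw [if_pos hk, if_neg (by omega)]
        ring
      · rw [if_neg hk, if_pos hk]
        ring
    refine ⟨?_, ?_, ?_, ?_, ?_, ?_⟩
    · simp only [pvStepA, pvStepB]
      rw [hsetbr]
      exact hMex.1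
    · simp only [pvStepB]
      rw [hsetbr]
      exact hseenlen
    · simp only [pvStepA]
      simp [hAlen]
    · simp only [pvStepB]
      rw [hsetbr]
      exact hAdv
    · simp only [pvStepA, pvStepB]
      rw [hsetbr, hAdv, hMex.2, take_set_succ sA.2 k _ (by omega), ← hout, hacc, hcomm]
    · simp only [pvStepA, pvStepB]
      rw [hsetbr, hAdv, hacc, if_neg (show ¬ (k + 1 = 0) by omega)]
      have hk0 : k + 1 - 1 = k := by omega
      rw [hk0, pvGsetL, if_pos (show k = k ∧ k < sA.2.length from ⟨rfl, by omega⟩), hMex.2, hcomm]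

-- running sums of ps
theorem sum_take_succ (ps : List Int) (k : Nat) (h : k < ps.length) :
    (ps.take (k+1)).sum = (ps.take k).sum + pvG ps k := by
  rw [List.take_succ, List.sum_append]
  simp [pvG, List.getD_eq_getElem?_getD, h]

-- A's second loop fills pres with running sums of ps
theorem presL (ps : List Int) (n' : Nat) (hps : ps.length = n') :
    ∀ k, k ≤ n' →
      ((List.range k).foldl (pvStepPres ps) (List.replicate n' 0)).length = n' ∧
      ∀ j, j < k → pvG ((List.range k).foldl (pvStepPres ps) (List.replicate n' 0)) j = (ps.take (j+1)).sum := by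
  intro k
  induction k with
  | zero => intro _; simp
  | succ k ih =>
    intro hk
    obtain ⟨hlen, hval⟩ := ih (by omega)
    set pres := (List.range k).foldl (pvStepPres ps) (List.replicate n' 0) with hpres
    have h1 : (List.range (k+1)).foldl (pvStepPres ps) (List.replicate n' 0) = pvStepPres ps pres k := by
      rw [List.range_succ, List.foldl_append, ← hpres]
      simp only [List.foldl_cons, List.foldl_nil]
    rw [h1]
    simp only [pvStepPres]
    refine ⟨by simp [hlen], ?_⟩
    intro j hj
    rcases Nat.lt_or_ge j k with hjk | hjk
    · rw [pvGsetL, if_neg (by omega)]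
      exact hval j hjk
    · have hjeq : j = k := by omega
      subst hjeq
      rw [pvGsetL, if_pos ⟨rfl, by omega⟩]
      by_cases hj0 : j = 0
      · subst hj0
        rw [sum_take_succ ps 0 (by omega)]
        simp
      · rw [if_pos hj0, hval (j-1) (by omega), sum_take_succ ps j (by omega)]
        have : j - 1 + 1 = j := by omega
        rw [this]
        ring

-- A's third loop: sufs[i] = total - pres[i-1]
theorem sufsL (ps pres : List Int) (n' : Nat) (hps : ps.length = n') (hpreslen : pres.length = n')
    (hpres : ∀ j, j < n' → pvG pres j = (ps.take (j+1)).sum) :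
    ∀ k, k ≤ n' →
      ((List.range k).foldl (pvStepSufs pres) ps).length = n' ∧
      ∀ j, j < k → pvG ((List.range k).foldl (pvStepSufs pres) ps) j = ps.sum - (ps.take j).sum := by
  intro k
  induction k with
  | zero => intro _; simp [hps]
  | succ k ih =>
    intro hk
    obtain ⟨hlen, hval⟩ := ih (by omega)
    set sufs := (List.range k).foldl (pvStepSufs pres) ps with hsufs
    have h1 : (List.range (k+1)).foldl (pvStepSufs pres) ps = pvStepSufs pres sufs k := by
      rw [List.range_succ, List.foldl_append, ← hsufs]
      simp only [List.foldl_cons, List.foldl_nil]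
    rw [h1]
    simp only [pvStepSufs]
    have htot : pvG pres (pres.length - 1) = ps.sum := by
      rw [hpreslen, hpres (n'-1) (by omega)]
      have : n' - 1 + 1 = n' := by omega
      rw [this, ← hps, List.take_length]
    refine ⟨by simp [hlen], ?_⟩
    intro j hj
    rcases Nat.lt_or_ge j k with hjk | hjk
    · rw [pvGsetL, if_neg (by omega)]
      exact hval j hjk
    · have hjeq : j = k := by omega
      subst hjeq
      rw [pvGsetL, if_pos ⟨rfl, by omega⟩, htot]
      by_cases hj0 : j = 0
      · subst hj0
        simp
      · rw [if_pos hj0, hpres (j-1) (by omega)]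
        have : j - 1 + 1 = j := by omega
        rw [this]
-- A's fourth loop writes back exactly ps
theorem ansL (n : Int) (ps pres sufs vis : List Int) (n' : Nat) (hnn : (n' : Int) = n)
    (hps : ps.length = n') (hpreslen : pres.length = n') (hvislen : vis.length = n')
    (hsufslen : sufs.length = n')
    (hpres : ∀ j, j < n' → pvG pres j = (ps.take (j+1)).sum)
    (hsufs : ∀ j, j < n' → pvG sufs j = ps.sum - (ps.take j).sum) :
    ∀ k, k ≤ n' →
      ((List.range k).foldl (pvStepAns n pres sufs) vis).length = n' ∧
      ∀ j, j < k → pvG ((List.range k).foldl (pvStepAns n pres sufs) vis) j = pvG ps j := by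
  intro k
  induction k with
  | zero => intro _; simp [hvislen]
  | succ k ih =>
    intro hk
    obtain ⟨hlen, hval⟩ := ih (by omega)
    set ans := (List.range k).foldl (pvStepAns n pres sufs) vis with hans
    have h1 : (List.range (k+1)).foldl (pvStepAns n pres sufs) vis = pvStepAns n pres sufs ans k := by
      rw [List.range_succ, List.foldl_append, ← hans]
      simp only [List.foldl_cons, List.foldl_nil]
    rw [h1]
    simp only [pvStepAns]
    have htot : pvG pres (pres.length - 1) = ps.sum := by
      rw [hpreslen, hpres (n'-1) (by omega)]
      have : n' - 1 + 1 = n' := by omega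
      rw [this, ← hps, List.take_length]
    refine ⟨by simp [hlen], ?_⟩
    intro j hj
    rcases Nat.lt_or_ge j k with hjk | hjk
    · rw [pvGsetL, if_neg (by omega)]
      exact hval j hjk
    · have hjeq : j = k := by omega
      subst hjeq
      rw [pvGsetL, if_pos ⟨rfl, by omega⟩, htot]
      have hprev : (if j ≠ 0 then pvG pres (j-1) else 0) = (ps.take j).sum := by
        by_cases hj0 : j = 0
        · subst hj0; simp
        · rw [if_pos hj0, hpres (j-1) (by omega)]
          have : j - 1 + 1 = j := by omega
          rw [this]
      rw [hprev]
      by_cases hlast : (j : Int) < n - 1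
      · have hjn : j + 1 < n' := by omega
        rw [if_pos hlast, hsufs (j+1) hjn, sum_take_succ ps j (by omega)]
        ring
      · have hjn : j = n' - 1 := by omega
        rw [if_neg hlast]
        have hsum : ps.sum = (ps.take (j+1)).sum := by
          have : j + 1 = n' := by omega
          rw [this, ← hps, List.take_length]
        rw [hsum, sum_take_succ ps j (by omega)]
        ring

-- ===== VERDICT (by name: the statement is the Claim_ definition above) =====

theorem solve_spec : Claim_equal_solve := by
  unfold Claim_equal_solve Spec_solve
  intro n a _ hpre
  obtain ⟨halen, hvals⟩ := hpre
  rcases Int.lt_or_le n 0 with hneg | hn0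
  · have h0 : n.toNat = 0 := by omega
    show solve n a = solve_alt n a
    simp [solve, solve_alt, h0]
  · have hnn : ((n.toNat : Nat) : Int) = n := by omega
    have hpre' : ∀ i : Nat, i < n.toNat → 0 ≤ pvG a i ∧ pvG a i < n := by
      intro i hi
      have hia : i < a.length := by omega
      have hgi : pvG a i = a[i] := by
        simp [pvG, List.getD_eq_getElem?_getD, hia]
      have hmem : a[i] ∈ a.take n.toNat := by
        have h1 : (a.take n.toNat)[i]'(by simp; omega) = a[i] := List.getElem_take
        rw [← h1]
        exact List.getElem_mem _
      rw [hgi]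
      exact hvals _ hmem
    obtain ⟨hInv, hBlen, hAlen, _, hout, _⟩ := mainloop n a hpre' n.toNat le_rfl
    set sA := (List.range n.toNat).foldl (pvStepA n a) (List.replicate n.toNat (-1), List.replicate n.toNat 0) with hsA
    set sB := (List.range n.toNat).foldl (pvStepB n a) (List.replicate n.toNat false, 0, 0, []) with hsB
    have hvislen : sA.1.length = n.toNat := by rw [hInv.1, hBlen]
    set pres := (List.range n.toNat).foldl (pvStepPres sA.2) (List.replicate n.toNat 0) with hpres
    set sufs := (List.range n.toNat).foldl (pvStepSufs pres) sA.2 with hsufs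
    have hsolve : solve n a = (List.range n.toNat).foldl (pvStepAns n pres sufs) sA.1 := rfl
    have hsalt : solve_alt n a = sB.2.2.2 := rfl
    obtain ⟨hpreslen, hpresval⟩ := presL sA.2 n.toNat hAlen n.toNat le_rfl
    obtain ⟨hsufslen, hsufsval⟩ := sufsL sA.2 pres n.toNat hAlen hpreslen hpresval n.toNat le_rfl
    obtain ⟨hanslen, hansval⟩ :=
      ansL n sA.2 pres sufs sA.1 n.toNat hnn hAlen hpreslen hvislen hsufslen hpresval hsufsval n.toNat le_rfl
    have hans : (List.range n.toNat).foldl (pvStepAns n pres sufs) sA.1 = sA.2 := by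
      apply List.ext_getElem
      · rw [hanslen, hAlen]
      · intro i h1 h2
        have hi : i < n.toNat := by omega
        have ha := hansval i hi
        rw [pvG, pvG, List.getD_eq_getElem?_getD, List.getD_eq_getElem?_getD] at ha
        simpa [List.getElem?_eq_getElem, h1, h2] using ha
    rw [hsolve, hsalt, hans, hout, ← hAlen, List.take_length]
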